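-- pv_equiv track=rewrite | github.com/EstevaoUyra/Hamming-Code-8-4 | src/algorithm.py | encode_hamming_8_4
-- ===== SOURCE A (Python) =====
-- def encode_hamming_8_4(data):
--     """
--     Encode a 4-bit data into an 8-bit (8, 4) Hamming code.
--
--     Parameters:
--     data (str): A string of 4 bits (e.g., '1011').
--
--     Returns:
--     str: 8-bit Hamming code.
--     """
--     if len(data) != 4 or any(bit not in ['0', '1'] for bit in data):
--         return "Invalid data. Please provide 4 bits."
--
--     # Place data bits
--     code = ['P1', 'P2', data[0], 'P4', data[1], data[2], data[3], 'P8']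
--
--     # Parity bit positions
--     parity_positions = [1, 2, 4, 8]
--
--     # Calculate parity bits
--     for p in parity_positions:
--         parity = 0
--         for i in range(1, 9):
--             if (i & p) or i == p:
--                 parity ^= int(code[i-1] if code[i-1] not in ['P1', 'P2', 'P4', 'P8'] else 0)
--         code[p-1] = str(parity)
--
--     return ''.join(code)
-- ===== SOURCE B (Python) =====
-- def encode_hamming_8_4(data):
--     """Closed-form (8,4) Hamming encoder: parity bits computed directly
--     instead of iterating over bitmask positions. P8 is 0 by the same rule
--     (its parity group contains only itself)."""
--     if len(data) != 4 or any(bit not in ['0', '1'] for bit in data):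
--         return "Invalid data. Please provide 4 bits."
--     b0, b1, b2, b3 = (int(c) for c in data)
--     p1 = b0 ^ b1 ^ b3
--     p2 = b0 ^ b2 ^ b3
--     p4 = b1 ^ b2 ^ b3
--     return f"{p1}{p2}{data[0]}{p4}{data[1]}{data[2]}{data[3]}0"
-- ===== Notes on version B (the rewrite author's own statement) =====
-- stated objective: simpler
-- what changed: Replaces the nested bitmask loops over parity positions and a mutable code list with closed-form parity formulas p1=b0^b1^b3, p2=b0^b2^b3, p4=b1^b2^b3 (and the constant '0' at position 8, which A's rule also yields) assembled directly into the output string.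
import Mathlib
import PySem

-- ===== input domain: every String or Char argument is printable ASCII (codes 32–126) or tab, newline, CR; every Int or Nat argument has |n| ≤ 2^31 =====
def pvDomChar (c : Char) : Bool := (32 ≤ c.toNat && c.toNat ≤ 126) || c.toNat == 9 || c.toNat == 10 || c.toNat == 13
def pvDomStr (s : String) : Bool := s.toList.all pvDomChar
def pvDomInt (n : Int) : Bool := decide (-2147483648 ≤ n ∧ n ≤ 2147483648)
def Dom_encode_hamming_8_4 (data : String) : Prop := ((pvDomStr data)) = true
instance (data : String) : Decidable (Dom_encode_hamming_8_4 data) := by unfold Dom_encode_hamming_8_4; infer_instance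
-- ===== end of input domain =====

-- ===== PORT A =====
-- B is a simpler closed-form re-implementation; equal return value on all inputs (A is total).
-- Port of A: build list of cell strings, then for each parity position p fold over range(1,9)
-- xoring the cells, writing the result back into the code list; finally join.
-- int(code[i-1]) is ported as (PySem.Int.ofStr? _).getD 0: after the guard every non-placeholder
-- cell is "0" or "1", so Python's int() never raises here.
def encode_hamming_8_4 (data : String) : String :=
  let cs := data.toList
  if cs.length ≠ 4 ∨ cs.any (fun bit => ¬(bit = '0' ∨ bit = '1')) then
    "Invalid data. Please provide 4 bits."
  else
    let code : List String :=
      ["P1", "P2", String.mk [cs.getD 0 ' '], "P4",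
       String.mk [cs.getD 1 ' '], String.mk [cs.getD 2 ' '], String.mk [cs.getD 3 ' '], "P8"]
    let code := [1, 2, 4, 8].foldl (fun (code : List String) (p : Nat) =>
      let parity := (PySem.List.pyRange 1 9 1).foldl (fun (parity : Int) (i : Int) =>
        if PySem.Int.band i (p : Int) ≠ 0 ∨ i = (p : Int) then
          -- code[i-1]: i ranges over 1..8 so i-1 is a valid non-negative index
          let s := code.getD (i - 1).toNat ""
          PySem.Int.bxor parity
            (if ¬(s = "P1" ∨ s = "P2" ∨ s = "P4" ∨ s = "P8")
             then (PySem.Int.ofStr? s).getD 0 else 0)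
        else parity) (0 : Int)
      code.set (p - 1) (PySem.Int.toStr parity)) code
    PySem.Str.join "" code

-- ===== PORT B =====
-- int(c) for a single data character
def pvBitInt (c : Char) : Int := (PySem.Int.ofStr? (String.mk [c])).getD 0

def encode_hamming_8_4_alt (data : String) : String :=
  let cs := data.toList
  if cs.length ≠ 4 ∨ cs.any (fun bit => ¬(bit = '0' ∨ bit = '1')) then
    "Invalid data. Please provide 4 bits."
  else
    let b0 := pvBitInt (cs.getD 0 ' ')
    let b1 := pvBitInt (cs.getD 1 ' ')
    let b2 := pvBitInt (cs.getD 2 ' ')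
    let b3 := pvBitInt (cs.getD 3 ' ')
    let p1 := PySem.Int.bxor (PySem.Int.bxor b0 b1) b3
    let p2 := PySem.Int.bxor (PySem.Int.bxor b0 b2) b3
    let p4 := PySem.Int.bxor (PySem.Int.bxor b1 b2) b3
    PySem.Int.toStr p1 ++ PySem.Int.toStr p2 ++ String.mk [cs.getD 0 ' '] ++
      PySem.Int.toStr p4 ++ String.mk [cs.getD 1 ' '] ++ String.mk [cs.getD 2 ' '] ++
      String.mk [cs.getD 3 ' '] ++ "0"

-- ===== PRECONDITION & SPEC =====
def Spec_encode_hamming_8_4 (data : String) (out : String) : Prop := out = encode_hamming_8_4_alt data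
instance (data : String) (out : String) : Decidable (Spec_encode_hamming_8_4 data out) := by unfold Spec_encode_hamming_8_4; infer_instance

-- ===== CLAIM (what is proved, stated in full; the proofs are below) =====
def Claim_equal_encode_hamming_8_4 : Prop := ∀ (data : String), Dom_encode_hamming_8_4 data → Spec_encode_hamming_8_4 data (encode_hamming_8_4 data)

-- ===== LEMMAS AND PROOFS =====

-- Both ports branch on the same guard over data.toList; on valid inputs the list is four bit
-- characters, so the claim reduces to 16 closed computations.
theorem pv_main (data : String) :
    encode_hamming_8_4 data = encode_hamming_8_4_alt data := by
  unfold encode_hamming_8_4 encode_hamming_8_4_alt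
  generalize data.toList = l
  by_cases hg : l.length ≠ 4 ∨ (l.any fun bit => ¬(bit = '0' ∨ bit = '1'))
  · rw [if_pos hg, if_pos hg]
  · rw [if_neg hg, if_neg hg]
    push Not at hg
    obtain ⟨hlen, hany⟩ := hg
    match l, hlen with
    | [a, b, c, d], _ =>
      simp only [ne_eq, List.any_cons, List.any_nil, Bool.or_false, Bool.or_eq_true,
        decide_eq_true_eq, not_or, not_and, not_not] at hany
      obtain ⟨ha, hb, hc, hd⟩ := hany
      have ha := (Decidable.em (a = '0')).elim Or.inl (fun h => Or.inr (ha h))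
      have hb := (Decidable.em (b = '0')).elim Or.inl (fun h => Or.inr (hb h))
      have hc := (Decidable.em (c = '0')).elim Or.inl (fun h => Or.inr (hc h))
      have hd := (Decidable.em (d = '0')).elim Or.inl (fun h => Or.inr (hd h))
      rcases ha with ha | ha <;> rcases hb with hb | hb <;>
        rcases hc with hc | hc <;> rcases hd with hd | hd <;>
        subst ha hb hc hd <;> decide

-- ===== VERDICT (by name: the statement is the Claim_ definition above) =====
theorem encode_hamming_8_4_spec : Claim_equal_encode_hamming_8_4 := by
  intro data _
  exact pv_main data
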